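-- pv_equiv track=rewrite | github.com/Don-Yin/Orthographic-DNN | bootstrap.py | get_model_class
-- ===== SOURCE A (Python) =====
-- def get_model_class(model):
--     classes = {
--         "ViTs": ["vit_b_16", "vit_l_32", "vit_b_32", "vit_l_16"],
--         "Convolutional Models": ["efficientnet_b1", "resnet101", "resnet50", "vgg16", "densenet169", "vgg19", "alexnet"],
--     }
--
--     for key in classes.keys():
--         if model in classes[key]:
--             return key
-- ===== SOURCE B (Python) =====
-- def get_model_class(model):
--     classes = {
--         "ViTs": ["vit_b_16", "vit_l_32", "vit_b_32", "vit_l_16"],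
--         "Convolutional Models": ["efficientnet_b1", "resnet101", "resnet50", "vgg16", "densenet169", "vgg19", "alexnet"],
--     }
--     name_to_class = {name: cat for cat, names in classes.items() for name in names}
--     return name_to_class.get(model)
-- ===== Notes on version B (the rewrite author's own statement) =====
-- stated objective: idiomatic
-- what changed: Replaces the loop over categories with per-category membership scans by a reverse name-to-category dict built once and a single .get lookup (None for unknown models).
import Mathlib
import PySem

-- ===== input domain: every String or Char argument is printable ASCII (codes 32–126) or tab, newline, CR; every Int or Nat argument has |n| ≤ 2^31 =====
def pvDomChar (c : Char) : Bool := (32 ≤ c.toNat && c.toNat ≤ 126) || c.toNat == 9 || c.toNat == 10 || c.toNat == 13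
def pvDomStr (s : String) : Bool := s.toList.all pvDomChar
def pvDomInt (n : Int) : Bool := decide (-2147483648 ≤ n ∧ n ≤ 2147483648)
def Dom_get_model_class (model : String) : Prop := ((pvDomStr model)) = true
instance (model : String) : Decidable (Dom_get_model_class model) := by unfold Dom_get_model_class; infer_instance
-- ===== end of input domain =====

-- B replaces the loop over categories (with a membership scan per category) by a
-- reverse name→category dict built once and a single lookup; objective: idiomatic.


-- ===== PORT A =====
-- the literal dict of A
def pvClassesA : PySem.Dict String (List String) :=
  PySem.Dict.ofList
    [("ViTs", ["vit_b_16", "vit_l_32", "vit_b_32", "vit_l_16"]),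
     ("Convolutional Models", ["efficientnet_b1", "resnet101", "resnet50", "vgg16", "densenet169", "vgg19", "alexnet"])]

-- for key in classes.keys(): if model in classes[key]: return key  (fall through → None)
def get_model_class (model : String) : Option String :=
  pvClassesA.keys.foldl
    (fun acc key =>
      match acc with
      | some r => some r
      | none => if model ∈ (pvClassesA.getD key []) then some key else none)
    none

-- ===== PORT B =====
-- name_to_class = {name: cat for cat, names in classes.items() for name in names}
def pvNameToClass : PySem.Dict String String :=
  PySem.Dict.ofList
    (pvClassesA.items.foldl (fun acc p => acc ++ p.2.map (fun n => (n, p.1))) [])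

-- return name_to_class.get(model)
def get_model_class_alt (model : String) : Option String :=
  pvNameToClass.get? model

-- ===== PRECONDITION & SPEC =====
def Spec_get_model_class (model : String) (out : Option String) : Prop := out = get_model_class_alt model
instance (model : String) (out : Option String) : Decidable (Spec_get_model_class model out) := by unfold Spec_get_model_class; infer_instance

-- ===== CLAIM (what is proved, stated in full; the proofs are below) =====
def Claim_equal_get_model_class : Prop := ∀ (model : String), Dom_get_model_class model → Spec_get_model_class model (get_model_class model)

-- ===== LEMMAS AND PROOFS =====

-- ===== VERDICT (by name: the statement is the Claim_ definition above) =====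
theorem get_model_class_spec : Claim_equal_get_model_class := by
  intro model _
  unfold Spec_get_model_class
  -- case split on the eleven known model names; each closes by evaluation,
  -- and an unknown model makes every membership/lookup test fail on both sides
  by_cases h1 : model = "vit_b_16"; · subst h1; decide
  by_cases h2 : model = "vit_l_32"; · subst h2; decide
  by_cases h3 : model = "vit_b_32"; · subst h3; decide
  by_cases h4 : model = "vit_l_16"; · subst h4; decide
  by_cases h5 : model = "efficientnet_b1"; · subst h5; decide
  by_cases h6 : model = "resnet101"; · subst h6; decide
  by_cases h7 : model = "resnet50"; · subst h7; decide
  by_cases h8 : model = "vgg16"; · subst h8; decide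
  by_cases h9 : model = "densenet169"; · subst h9; decide
  by_cases h10 : model = "vgg19"; · subst h10; decide
  by_cases h11 : model = "alexnet"; · subst h11; decide
  unfold get_model_class get_model_class_alt
  rw [show pvClassesA = PySem.Dict.mk
    [("ViTs", ["vit_b_16", "vit_l_32", "vit_b_32", "vit_l_16"]),
     ("Convolutional Models", ["efficientnet_b1", "resnet101", "resnet50", "vgg16", "densenet169", "vgg19", "alexnet"])] from by decide,
    show pvNameToClass = PySem.Dict.mk
    [("vit_b_16","ViTs"),("vit_l_32","ViTs"),("vit_b_32","ViTs"),("vit_l_16","ViTs"),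
     ("efficientnet_b1","Convolutional Models"),("resnet101","Convolutional Models"),
     ("resnet50","Convolutional Models"),("vgg16","Convolutional Models"),
     ("densenet169","Convolutional Models"),("vgg19","Convolutional Models"),
     ("alexnet","Convolutional Models")] from by decide]
  simp [PySem.Dict.getD, PySem.Dict.get?, beq_iff_eq,
        h1, h2, h3, h4, h5, h6, h7, h8, h9, h10, h11,
        Ne.symm h1, Ne.symm h2, Ne.symm h3, Ne.symm h4, Ne.symm h5, Ne.symm h6,
        Ne.symm h7, Ne.symm h8, Ne.symm h9, Ne.symm h10, Ne.symm h11]
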